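-- pv_equiv track=rewrite | github.com/MachineLearningAmateur/CodeOffTheGrid | scripts/verify_runner_catalog_examples.py | extract_param_names
-- ===== SOURCE A (Python) =====
-- def extract_param_names(params: str) -> list[str]:
--     names = []
--     current = []
--     depth = 0
--     quote = ""
--
--     for char in params:
--         if quote:
--             current.append(char)
--             if char == quote:
--                 quote = ""
--             continue
--         if char in {"'", '"'}:
--             quote = char
--             current.append(char)
--             continue
--         if char in "([{" :
--             depth += 1
--             current.append(char)
--             continue
--         if char in ")]}":
--             depth = max(0, depth - 1)
--             current.append(char)
--             continue
--         if char == "," and depth == 0: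
--             names.append(extract_param_name("".join(current)))
--             current = []
--             continue
--         current.append(char)
--
--     if current:
--         names.append(extract_param_name("".join(current)))
--     return [name for name in names if name]
--
-- def extract_param_name(raw_param: str) -> str | None:
--     param = raw_param.strip()
--     if not param or param in {"/", "*"}:
--         return None
--     param = param.split(":", 1)[0].split("=", 1)[0].strip()
--     return param.lstrip("*") or None
-- ===== SOURCE B (Python) =====
-- def extract_param_names(params: str) -> list[str]:
--     # Recursive decomposition: a helper consumes ONE top-level segment (returning
--     # the segment and the remaining text after the comma, or None at end of
--     # string); the outer loop repeatedly applies it, then maps extract_param_name.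
--     def next_segment(s):
--         seg = []
--         depth = 0
--         quote = ""
--         for i, ch in enumerate(s):
--             if quote:
--                 seg.append(ch)
--                 if ch == quote:
--                     quote = ""
--             elif ch in {"'", '"'}:
--                 quote = ch
--                 seg.append(ch)
--             elif ch in "([{":
--                 depth += 1
--                 seg.append(ch)
--             elif ch in ")]}":
--                 depth = max(0, depth - 1)
--                 seg.append(ch)
--             elif ch == "," and depth == 0:
--                 return "".join(seg), s[i + 1:]
--             else:
--                 seg.append(ch)
--         return "".join(seg), None
--
--     segments = []
--     rest = params
--     while True:
--         seg, rest = next_segment(rest)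
--         segments.append(seg)
--         if rest is None:
--             break
--     return [n for n in map(extract_param_name, segments) if n]
--
-- def extract_param_name(raw_param: str) -> str | None:
--     param = raw_param.strip()
--     if not param or param in {"/", "*"}:
--         return None
--     param = param.split(":", 1)[0].split("=", 1)[0].strip()
--     return param.lstrip("*") or None
-- ===== Notes on version B (the rewrite author's own statement) =====
-- stated objective: alternative
-- what changed: A is one fold that flushes a character buffer at each top-level comma; B instead repeatedly calls a helper that consumes exactly one top-level segment and returns the remainder after the comma, collecting the segments by that outer recursion and mapping extract_param_name over them.
import Mathlib
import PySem

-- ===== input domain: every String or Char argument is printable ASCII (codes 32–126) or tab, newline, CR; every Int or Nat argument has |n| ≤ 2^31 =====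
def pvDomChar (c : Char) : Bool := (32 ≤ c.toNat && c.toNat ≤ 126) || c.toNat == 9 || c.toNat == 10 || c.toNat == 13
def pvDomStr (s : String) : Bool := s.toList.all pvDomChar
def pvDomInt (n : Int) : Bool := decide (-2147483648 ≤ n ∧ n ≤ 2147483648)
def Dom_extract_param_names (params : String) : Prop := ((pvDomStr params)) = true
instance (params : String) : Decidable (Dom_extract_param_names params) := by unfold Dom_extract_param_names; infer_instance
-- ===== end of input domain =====

-- B replaces A's single fold with a flushed buffer by a recursive decomposition:
-- a helper consumes one top-level segment and returns the remainder, the outer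
-- recursion collects the segments (objective: alternative, same cost).

-- shared helper: port of extract_param_name (used verbatim by both Pythons)
-- `param.lstrip("*")` is ported by hand as dropWhile (· == '*'): exact, drops leading '*'s.
def epn_name (raw_param : List Char) : Option (List Char) :=
  let param := PySem.Chars.strip raw_param
  if param = [] || param = ['/'] || param = ['*'] then none
  else
    let param := PySem.Chars.strip
      ((PySem.Chars.splitOnMax ((PySem.Chars.splitOnMax param [':'] 1).headD []) ['='] 1).headD [])
    let r := param.dropWhile (· == '*')
    if r = [] then none else some r

-- truthy filter for `[n for n in … if n]` (drops None and "")
def epn_keep (n : Option (List Char)) : Option String :=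
  match n with
  | none => none
  | some s => if s = [] then none else some (String.ofList s)

-- ===== PORT A =====
-- loop body of A: state (names, current, depth, quote)
def epnA_step (st : List (Option (List Char)) × List Char × Int × Option Char) (char : Char) :
    List (Option (List Char)) × List Char × Int × Option Char :=
  match st with
  | (names, current, depth, quote) =>
    match quote with
    | some q => (names, current ++ [char], depth, if char == q then none else some q)
    | none =>
      if char == '\'' || char == '"' then (names, current ++ [char], depth, some char)
      else if char == '(' || char == '[' || char == '{' then (names, current ++ [char], depth + 1, none)
      else if char == ')' || char == ']' || char == '}' then (names, current ++ [char], max 0 (depth - 1), none)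
      else if char == ',' && depth == 0 then (names ++ [epn_name current], ([] : List Char), depth, none)
      else (names, current ++ [char], depth, none)

def extract_param_names (params : String) : List String :=
  match params.toList.foldl epnA_step ([], [], 0, none) with
  | (names, current, _, _) =>
    let names := if current ≠ [] then names ++ [epn_name current] else names
    names.filterMap epn_keep

-- ===== PORT B =====
-- inner helper `next_segment`: scans for the first top-level comma, returning
-- (segment, some remainder) — Python's early `return seg, s[i+1:]` — or
-- (segment, none) when the string ends without a top-level comma.
def epnB_next (s : List Char) (depth : Int) (quote : Option Char) : List Char × Option (List Char) :=
  match s with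
  | [] => ([], none)
  | ch :: rest =>
    match quote with
    | some q =>
      let (seg, r) := epnB_next rest depth (if ch == q then none else some q)
      (ch :: seg, r)
    | none =>
      if ch == '\'' || ch == '"' then
        let (seg, r) := epnB_next rest depth (some ch)
        (ch :: seg, r)
      else if ch == '(' || ch == '[' || ch == '{' then
        let (seg, r) := epnB_next rest (depth + 1) none
        (ch :: seg, r)
      else if ch == ')' || ch == ']' || ch == '}' then
        let (seg, r) := epnB_next rest (max 0 (depth - 1)) none
        (ch :: seg, r)
      else if ch == ',' && depth == 0 then ([], some rest)
      else
        let (seg, r) := epnB_next rest depth none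
        (ch :: seg, r)

-- the remainder returned by `next_segment` is strictly shorter (outer loop terminates)
lemma epnB_next_lt : ∀ (s : List Char) (depth : Int) (quote : Option Char) (seg r : List Char),
    epnB_next s depth quote = (seg, some r) → r.length < s.length := by
  intro s
  induction s with
  | nil => intro depth quote seg r h; simp [epnB_next] at h
  | cons ch rest ih =>
    intro depth quote seg r h
    simp only [epnB_next] at h
    cases quote with
    | some q =>
      rcases hsr : epnB_next rest depth (if ch == q then none else some q) with ⟨seg', r'⟩
      simp only [hsr] at h
      injection h with h1 h2; subst h2
      have := ih _ _ _ _ hsr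
      simp only [List.length_cons]; omega
    | none =>
      split_ifs at h with h1 h2 h3 h4
      · rcases hsr : epnB_next rest depth (some ch) with ⟨seg', r'⟩
        simp only [hsr] at h
        injection h with h1' h2'; subst h2'
        have := ih _ _ _ _ hsr
        simp only [List.length_cons]; omega
      · rcases hsr : epnB_next rest (depth + 1) none with ⟨seg', r'⟩
        simp only [hsr] at h
        injection h with h1' h2'; subst h2'
        have := ih _ _ _ _ hsr
        simp only [List.length_cons]; omega
      · rcases hsr : epnB_next rest (max 0 (depth - 1)) none with ⟨seg', r'⟩
        simp only [hsr] at h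
        injection h with h1' h2'; subst h2'
        have := ih _ _ _ _ hsr
        simp only [List.length_cons]; omega
      · injection h with h1' h2'
        have : r = rest := by injection h2' with h3'; exact h3'.symm
        subst this; simp
      · rcases hsr : epnB_next rest depth none with ⟨seg', r'⟩
        simp only [hsr] at h
        injection h with h1' h2'; subst h2'
        have := ih _ _ _ _ hsr
        simp only [List.length_cons]; omega

def segsB (cs : List Char) : List (List Char) :=
  match h : epnB_next cs 0 none with
  | (seg, none) => [seg]
  | (seg, some r) => seg :: segsB r
termination_by cs.length
decreasing_by exact epnB_next_lt cs 0 none seg r h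

def extract_param_names_alt (params : String) : List String :=
  ((segsB params.toList).map epn_name).filterMap epn_keep

-- ===== PRECONDITION & SPEC =====
def Spec_extract_param_names (params : String) (out : List String) : Prop := out = extract_param_names_alt params
instance (params : String) (out : List String) : Decidable (Spec_extract_param_names params out) := by unfold Spec_extract_param_names; infer_instance

-- ===== CLAIM (what is proved, stated in full; the proofs are below) =====
def Claim_equal_extract_param_names : Prop := ∀ (params : String), Dom_extract_param_names params → Spec_extract_param_names params (extract_param_names params)

-- ===== LEMMAS AND PROOFS =====

-- A's loop projected to (names, current) once the loop ends: names with the buffer flushed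
def pvFin (st : List (Option (List Char)) × List Char × Int × Option Char) : List (Option (List Char)) :=
  st.1 ++ [epn_name st.2.1]

-- when next_segment finds no top-level comma, A's fold over the same text only grows the buffer
lemma lemA1 : ∀ (cs : List Char) (depth : Int) (quote : Option Char)
    (names : List (Option (List Char))) (current seg : List Char),
    epnB_next cs depth quote = (seg, none) →
    ∃ d q, cs.foldl epnA_step (names, current, depth, quote) = (names, current ++ seg, d, q) := by
  intro cs
  induction cs with
  | nil =>
    intro depth quote names current seg h
    simp only [epnB_next] at h
    injection h with h1 h2
    exact ⟨depth, quote, by simp [← h1]⟩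
  | cons ch rest ih =>
    intro depth quote names current seg h
    simp only [epnB_next] at h
    rw [List.foldl_cons]
    simp only [epnA_step]
    cases quote with
    | some q =>
      rcases hsr : epnB_next rest depth (if ch == q then none else some q) with ⟨seg', r'⟩
      simp only [hsr] at h
      injection h with h1 h2; subst h1; subst h2
      obtain ⟨d, q', hf⟩ := ih depth _ names (current ++ [ch]) seg' hsr
      exact ⟨d, q', by rw [hf]; simp⟩
    | none =>
      split_ifs at h ⊢ with h1 h2 h3 h4
      · rcases hsr : epnB_next rest depth (some ch) with ⟨seg', r'⟩
        simp only [hsr] at h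
        injection h with ha hb; subst ha; subst hb
        obtain ⟨d, q', hf⟩ := ih depth _ names (current ++ [ch]) seg' hsr
        exact ⟨d, q', by rw [hf]; simp⟩
      · rcases hsr : epnB_next rest (depth + 1) none with ⟨seg', r'⟩
        simp only [hsr] at h
        injection h with ha hb; subst ha; subst hb
        obtain ⟨d, q', hf⟩ := ih (depth + 1) none names (current ++ [ch]) seg' hsr
        exact ⟨d, q', by rw [hf]; simp⟩
      · rcases hsr : epnB_next rest (max 0 (depth - 1)) none with ⟨seg', r'⟩
        simp only [hsr] at h
        injection h with ha hb; subst ha; subst hb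
        obtain ⟨d, q', hf⟩ := ih (max 0 (depth - 1)) none names (current ++ [ch]) seg' hsr
        exact ⟨d, q', by rw [hf]; simp⟩
      · injection h with ha hb; cases hb
      · rcases hsr : epnB_next rest depth none with ⟨seg', r'⟩
        simp only [hsr] at h
        injection h with ha hb; subst ha; subst hb
        obtain ⟨d, q', hf⟩ := ih depth none names (current ++ [ch]) seg' hsr
        exact ⟨d, q', by rw [hf]; simp⟩

-- when next_segment returns a remainder, A's fold flushes exactly that segment and continues on the remainder
lemma lemA2 : ∀ (cs : List Char) (depth : Int) (quote : Option Char)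
    (names : List (Option (List Char))) (current seg r : List Char),
    epnB_next cs depth quote = (seg, some r) →
    cs.foldl epnA_step (names, current, depth, quote)
      = r.foldl epnA_step (names ++ [epn_name (current ++ seg)], [], 0, none) := by
  intro cs
  induction cs with
  | nil =>
    intro depth quote names current seg r h
    simp [epnB_next] at h
  | cons ch rest ih =>
    intro depth quote names current seg r h
    simp only [epnB_next] at h
    rw [List.foldl_cons]
    simp only [epnA_step]
    cases quote with
    | some q =>
      rcases hsr : epnB_next rest depth (if ch == q then none else some q) with ⟨seg', r'⟩
      simp only [hsr] at h
      injection h with h1 h2; subst h1; subst h2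
      rw [ih depth _ names (current ++ [ch]) seg' r hsr]; simp
    | none =>
      split_ifs at h ⊢ with h1 h2 h3 h4
      · rcases hsr : epnB_next rest depth (some ch) with ⟨seg', r'⟩
        simp only [hsr] at h
        injection h with ha hb; subst ha; subst hb
        rw [ih depth _ names (current ++ [ch]) seg' r hsr]; simp
      · rcases hsr : epnB_next rest (depth + 1) none with ⟨seg', r'⟩
        simp only [hsr] at h
        injection h with ha hb; subst ha; subst hb
        rw [ih (depth + 1) none names (current ++ [ch]) seg' r hsr]; simp
      · rcases hsr : epnB_next rest (max 0 (depth - 1)) none with ⟨seg', r'⟩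
        simp only [hsr] at h
        injection h with ha hb; subst ha; subst hb
        rw [ih (max 0 (depth - 1)) none names (current ++ [ch]) seg' r hsr]; simp
      · injection h with ha hb
        have hr : r = rest := by injection hb with hc; exact hc.symm
        have hd0 : depth = 0 := by
          have := (Bool.and_eq_true _ _).mp h4
          simpa using this.2
        subst hr; subst hd0; subst ha; simp
      · rcases hsr : epnB_next rest depth none with ⟨seg', r'⟩
        simp only [hsr] at h
        injection h with ha hb; subst ha; subst hb
        rw [ih depth none names (current ++ [ch]) seg' r hsr]; simp

lemma segsB_eq_none (cs s : List Char) (h : epnB_next cs 0 none = (s, none)) :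
    segsB cs = [s] := by
  rw [segsB]; split <;> simp_all

lemma segsB_eq_some (cs s r : List Char) (h : epnB_next cs 0 none = (s, some r)) :
    segsB cs = s :: segsB r := by
  rw [segsB]
  split <;> rename_i h' <;> rw [h] at h' <;> injection h' with ha hb
  · cases hb
  · subst ha
    have : r = _ := Option.some.inj hb
    rw [this]

-- main invariant: A's (names, buffer) after the fold, flushed, is epn_name over B's segments
lemma lemB : ∀ (n : Nat) (cs : List Char), cs.length ≤ n →
    ∀ (names : List (Option (List Char))) (current : List Char),
    ∃ s t, segsB cs = s :: t ∧
      pvFin (cs.foldl epnA_step (names, current, 0, none))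
        = names ++ epn_name (current ++ s) :: t.map epn_name := by
  intro n
  induction n with
  | zero =>
    intro cs hlen names current
    have : cs = [] := List.length_eq_zero_iff.mp (Nat.le_zero.mp hlen)
    subst this
    refine ⟨[], [], by rw [segsB_eq_none [] [] rfl], ?_⟩
    simp [pvFin]
  | succ n ih =>
    intro cs hlen names current
    rcases h : epnB_next cs 0 none with ⟨s, ropt⟩
    cases ropt with
    | none =>
      obtain ⟨d, q, hf⟩ := lemA1 cs 0 none names current s h
      refine ⟨s, [], segsB_eq_none cs s h, ?_⟩
      rw [hf]; simp [pvFin]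
    | some r =>
      rw [lemA2 cs 0 none names current s r h]
      have hlt := epnB_next_lt cs 0 none s r h
      obtain ⟨s', t', hseg', hfin⟩ := ih r (by omega) (names ++ [epn_name (current ++ s)]) []
      refine ⟨s, segsB r, segsB_eq_some cs s r h, ?_⟩
      rw [hfin, hseg']
      simp

lemma epn_nil : epn_name [] = none := by decide

-- ===== LEMMAS AND PROOFS =====

-- ===== VERDICT (by name: the statement is the Claim_ definition above) =====
theorem extract_param_names_spec : Claim_equal_extract_param_names := by
  unfold Claim_equal_extract_param_names Spec_extract_param_names
  intro params _
  unfold extract_param_names extract_param_names_alt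
  obtain ⟨s, t, hseg, hfin⟩ := lemB params.toList.length params.toList le_rfl [] []
  rcases hres : params.toList.foldl epnA_step ([], [], 0, none) with ⟨ns, cur, d, q⟩
  rw [hres] at hfin
  simp only [pvFin, List.nil_append] at hfin
  rw [hseg]
  simp only [List.map_cons]
  rw [← hfin]
  by_cases hc : cur = []
  · subst hc
    simp [List.filterMap_append, epn_nil, epn_keep]
  · simp [hc]
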